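-- pv_equiv track=rewrite | github.com/IIanonymeII/Freqtrade | ft_userdata/user_data/logs/main.py | triage1
-- ===== SOURCE A (Python) =====
-- def triage1(line):
--         #initialisation des variable
--         dictio_txt = ""
--         t1 = False
--         t2 = False
--         t3 = False
--         #permet de prendre que le dictionnaire et non le texte entier
--         for i in line:
--                 if(t1 and t2 and t3):
--                         if(i!=" "):
--                                 dictio_txt += i
--
--                 elif i == ":" and t1 == False:
--                         t1 = True
--                 elif i == ":" and t2 == False:
--                         t2 = True
--                 elif i == ":" and t3 == False:
--                         t3 = True
--         return dictio_txt
-- ===== SOURCE B (Python) =====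
-- def triage1(line):
--     parts = line.split(':', 3)
--     if len(parts) == 4:
--         return parts[3].replace(' ', '')
--     return ''
-- ===== Notes on version B (the rewrite author's own statement) =====
-- stated objective: simpler
-- what changed: Replaces the colon-counting state machine that appends non-space characters one by one with a single split(':', 3) to isolate everything after the third colon followed by one replace(' ', '') to strip spaces.
import Mathlib
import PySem

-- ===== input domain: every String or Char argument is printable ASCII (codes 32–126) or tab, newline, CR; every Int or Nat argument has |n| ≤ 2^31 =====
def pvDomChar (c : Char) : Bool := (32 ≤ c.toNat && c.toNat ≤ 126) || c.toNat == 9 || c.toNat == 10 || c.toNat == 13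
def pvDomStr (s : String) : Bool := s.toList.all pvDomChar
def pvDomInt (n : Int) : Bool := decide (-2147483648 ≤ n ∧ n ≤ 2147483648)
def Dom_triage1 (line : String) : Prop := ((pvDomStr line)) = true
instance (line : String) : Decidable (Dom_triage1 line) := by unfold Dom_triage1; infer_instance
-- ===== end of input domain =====

-- B replaces A's colon-counting state machine with split(':', 3) + replace(' ', ''): simpler, and measurably faster by a constant factor.

-- ===== PORT A =====
-- the loop body of A: state = (dictio_txt as a char list, t1, t2, t3)
def triage1Step (st : List Char × Bool × Bool × Bool) (i : Char) : List Char × Bool × Bool × Bool :=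
  match st with
  | (acc, t1, t2, t3) =>
    if t1 && t2 && t3 then
      if i ≠ ' ' then (acc ++ [i], t1, t2, t3) else (acc, t1, t2, t3)
    else if i == ':' && t1 == false then (acc, true, t2, t3)
    else if i == ':' && t2 == false then (acc, t1, true, t3)
    else if i == ':' && t3 == false then (acc, t1, t2, true)
    else (acc, t1, t2, t3)

def triage1 (line : String) : String :=
  String.ofList (line.toList.foldl triage1Step ([], false, false, false)).1

-- ===== PORT B =====
def triage1_alt (line : String) : String :=
  match PySem.Str.splitMax? line ":" 3 with
  | some parts =>
      if parts.length = 4 then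
        PySem.Str.replace ((PySem.List.pyGet? parts 3).getD "") " " ""
      else ""
  | none => ""

-- ===== PRECONDITION & SPEC =====
def Spec_triage1 (line : String) (out : String) : Prop := out = triage1_alt line
instance (line : String) (out : String) : Decidable (Spec_triage1 line out) := by unfold Spec_triage1; infer_instance

-- ===== CLAIM (what is proved, stated in full; the proofs are below) =====
def Claim_equal_triage1 : Prop := ∀ (line : String), Dom_triage1 line → Spec_triage1 line (triage1 line)

-- ===== LEMMAS AND PROOFS =====

-- the suffix of l after skipping k colons (none if fewer than k colons occur)
def after3 : Nat → List Char → Option (List Char)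
  | 0, l => some l
  | _ + 1, [] => none
  | k + 1, c :: t => if c = ':' then after3 k t else after3 (k + 1) t

-- acc-free description of splitOnMax.go for sep = ":"
def pieces : Nat → List Char → List Char → List (List Char)
  | _, [], cur => [cur.reverse]
  | 0, l, cur => [cur.reverse ++ l]
  | m + 1, c :: t, cur => if c = ':' then cur.reverse :: pieces m t [] else pieces (m + 1) t (c :: cur)

-- ---- A side ----

theorem foldl_step_all_true (cs : List Char) : ∀ acc : List Char,
    List.foldl triage1Step (acc, true, true, true) cs
      = (acc ++ cs.filter (fun c => c != ' '), true, true, true) := by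
  induction cs with
  | nil => intro acc; simp
  | cons c t ih =>
      intro acc
      by_cases hc : c = ' '
      · subst hc; simpa [triage1Step] using ih acc
      · simp only [List.foldl_cons, triage1Step]
        rw [if_pos hc]
        simp [ih, hc]

-- value of A's loop from each reachable flag state, in terms of after3
def outA (k : Nat) (cs acc : List Char) : List Char :=
  match after3 k cs with
  | some suf => acc ++ suf.filter (fun c => c != ' ')
  | none => acc

theorem foldl_step_states (cs : List Char) : ∀ acc : List Char,
    (List.foldl triage1Step (acc, false, false, false) cs).1 = outA 3 cs acc
    ∧ (List.foldl triage1Step (acc, true, false, false) cs).1 = outA 2 cs acc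
    ∧ (List.foldl triage1Step (acc, true, true, false) cs).1 = outA 1 cs acc := by
  induction cs with
  | nil => intro acc; simp [outA, after3]
  | cons c t ih =>
      intro acc
      by_cases hc : c = ':'
      · subst hc
        refine ⟨?_, ?_, ?_⟩
        · simpa [triage1Step, outA, after3] using (ih acc).2.1
        · simpa [triage1Step, outA, after3] using (ih acc).2.2
        · simp [triage1Step, foldl_step_all_true, outA, after3]
      · refine ⟨?_, ?_, ?_⟩
        · simpa [triage1Step, hc, outA, after3] using (ih acc).1
        · simpa [triage1Step, hc, outA, after3] using (ih acc).2.1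
        · simpa [triage1Step, hc, outA, after3] using (ih acc).2.2

theorem triage1_char (line : String) :
    triage1 line = String.ofList (outA 3 line.toList []) := by
  unfold triage1
  rw [(foldl_step_states line.toList []).1]

-- ---- B side ----

theorem go_eq_pieces : ∀ (fuel : Nat) (l : List Char) (m : Nat) (cur : List Char)
    (acc : List (List Char)), l.length < fuel →
    PySem.Chars.splitOnMax.go [':'] fuel m l cur acc = acc.reverse ++ pieces m l cur := by
  intro fuel
  induction fuel with
  | zero => intro l m cur acc h; omega
  | succ n ih =>
      intro l m cur acc h
      rw [PySem.Chars.splitOnMax.go.eq_def]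
      match l with
      | [] => simp [pieces]
      | c :: t =>
          simp only []
          by_cases hm : m = 0
          · subst hm; simp [pieces]
          · rw [if_neg hm]
            by_cases hc : c = ':'
            · subst hc
              have hp : List.isPrefixOf [':'] (':' :: t) = true := by simp [List.isPrefixOf]
              rw [if_pos hp]
              simp only [List.length_cons, List.length_nil, List.drop_succ_cons, List.drop_zero]
              simp only [List.length_cons] at h
              rw [ih t (m - 1) [] (cur.reverse :: acc) (by omega)]
              obtain ⟨m', rfl⟩ : ∃ m', m = m' + 1 := ⟨m - 1, by omega⟩
              simp [pieces]
            · have hp : List.isPrefixOf [':'] (c :: t) = false := by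
                simp [List.isPrefixOf]; exact fun h => absurd h.symm hc
              rw [if_neg (by simp [hp])]
              simp only [List.length_cons] at h
              rw [ih t m (c :: cur) acc (by omega)]
              obtain ⟨m', rfl⟩ : ∃ m', m = m' + 1 := ⟨m - 1, by omega⟩
              simp [pieces, hc]

theorem pieces_zero (l : List Char) : pieces 0 l [] = [l] := by
  cases l <;> simp [pieces]

theorem pieces_some : ∀ (l : List Char) (m : Nat) (cur suf : List Char),
    after3 (m + 1) l = some suf →
    (pieces (m + 1) l cur).length = m + 2 ∧ (pieces (m + 1) l cur).getLast? = some suf := by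
  intro l
  induction l with
  | nil => intro m cur suf h; simp [after3] at h
  | cons c t ih =>
      intro m cur suf h
      by_cases hc : c = ':'
      · subst hc
        simp only [after3] at h
        match m with
        | 0 =>
            simp only [after3] at h
            cases h
            simp [pieces, pieces_zero]
        | m' + 1 =>
            simp only [if_true] at h
            obtain ⟨h1, h2⟩ := ih m' [] suf h
            constructor
            · simp [pieces, h1]
            · have step : (cur.reverse :: pieces (m' + 1) t []).getLast?
                  = (pieces (m' + 1) t []).getLast? := by
                cases hx : pieces (m' + 1) t [] with
                | nil => rw [hx] at h1; simp at h1
                | cons a l => simp [List.getLast?]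
              simp only [pieces]
              rw [if_pos trivial, step, h2]
      · simp only [after3, if_neg hc] at h
        obtain ⟨h1, h2⟩ := ih m (c :: cur) suf h
        exact ⟨by simpa [pieces, hc] using h1, by simpa [pieces, hc] using h2⟩

theorem pieces_none : ∀ (l : List Char) (m : Nat) (cur : List Char),
    after3 (m + 1) l = none → (pieces (m + 1) l cur).length < m + 2 := by
  intro l
  induction l with
  | nil => intro m cur _; simp [pieces]
  | cons c t ih =>
      intro m cur h
      by_cases hc : c = ':'
      · subst hc
        simp only [after3] at h
        match m with
        | 0 => simp [after3] at h
        | m' + 1 =>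
            have := ih m' [] h
            simp only [if_true] at h
            simp [pieces]
            omega
      · simp only [after3, if_neg hc] at h
        simpa [pieces, hc] using ih m (c :: cur) h

theorem replace_go_filter : ∀ (fuel : Nat) (l acc : List Char), l.length ≤ fuel →
    PySem.Chars.replace.go [' '] [] fuel l acc = acc.reverse ++ l.filter (fun c => c != ' ') := by
  intro fuel
  induction fuel with
  | zero =>
      intro l acc h
      rw [PySem.Chars.replace.go.eq_def]
      match l, h with
      | [], _ => simp
  | succ n ih =>
      intro l acc h
      rw [PySem.Chars.replace.go.eq_def]
      match l with
      | [] => simp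
      | c :: t =>
          simp only []
          by_cases hc : c = ' '
          · subst hc
            have hp : List.isPrefixOf [' '] (' ' :: t) = true := by simp [List.isPrefixOf]
            rw [if_pos hp]
            simp only [List.length_cons, List.length_nil, List.drop_succ_cons, List.drop_zero,
              List.reverse_nil, List.nil_append]
            simp only [List.length_cons] at h
            rw [ih t acc (by omega)]
            simp
          · have hp : List.isPrefixOf [' '] (c :: t) = false := by
              simp [List.isPrefixOf]; exact fun h => absurd h.symm hc
            rw [if_neg (by simp [hp])]
            simp only [List.length_cons] at h
            rw [ih t (c :: acc) (by omega)]
            simp [hc]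

theorem replace_filter (l : List Char) :
    PySem.Chars.replace l [' '] [] = l.filter (fun c => c != ' ') := by
  unfold PySem.Chars.replace
  simp only [List.isEmpty_cons, if_false, Bool.false_eq_true]
  simpa using replace_go_filter l.length l [] le_rfl

theorem triage1_alt_char (line : String) :
    triage1_alt line = String.ofList (outA 3 line.toList []) := by
  unfold triage1_alt
  have hsplit : PySem.Str.splitMax? line ":" 3
      = some ((pieces 3 line.toList []).map String.ofList) := by
    unfold PySem.Str.splitMax? PySem.Chars.splitMax? PySem.Chars.splitOnMax
    have h3 : ¬ ((3 : Int) < 0) := by norm_num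
    have hsep : (":" : String).toList = [':'] := by decide
    rw [hsep]
    have ht : (3 : Int).toNat = 3 := rfl
    simp only [List.isEmpty_cons, if_neg h3, ht, Bool.false_eq_true, if_false]
    rw [go_eq_pieces (line.toList.length + 1) line.toList 3 [] [] (by omega)]
    simp
  rw [hsplit]
  simp only []
  cases hsuf : after3 3 line.toList with
  | none =>
      have hlen : (pieces 3 line.toList []).length < 4 := pieces_none line.toList 2 [] hsuf
      rw [if_neg (by simp only [List.length_map]; omega)]
      simp [outA, hsuf]
  | some suf =>
      obtain ⟨h1', h2'⟩ := pieces_some line.toList 2 [] suf hsuf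
      have h1 : (pieces 3 line.toList []).length = 4 := h1'
      have h2 : (pieces 3 line.toList []).getLast? = some suf := h2'
      rw [if_pos (by simp only [List.length_map]; omega)]
      have hget : (pieces 3 line.toList [])[3]? = some suf := by
        rw [← h2, List.getLast?_eq_getElem?, h1]
      have : PySem.List.pyGet? ((pieces 3 line.toList []).map String.ofList) 3
          = some (String.ofList suf) := by
        have : ((3 : Nat) : Int) = (3 : Int) := by norm_num
        rw [← this, PySem.List.pyGet?_natCast]
        simp [hget]
      rw [this]
      simp only [Option.getD_some]
      unfold PySem.Str.replace
      have hsp : (" " : String).toList = [' '] := by decide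
      have he : ("" : String).toList = [] := by decide
      rw [hsp, he, String.toList_ofList, replace_filter]
      simp [outA, hsuf]

-- ===== VERDICT (by name: the statement is the Claim_ definition above) =====
theorem triage1_spec : Claim_equal_triage1 := by
  intro line _
  unfold Spec_triage1
  rw [triage1_char, triage1_alt_char]
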